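-- pv_equiv track=rewrite | github.com/jungwonkkim/swexpert | pro62049.py | solution
-- ===== SOURCE A (Python) =====
-- def solution(n):
--     answer_memo = [[0]]
--     if n >=2:
--         for i in range(2,n+1):
--             new_list = [0,1] * (2**(i-2))
--             old_list = answer_memo[-1]
--             answer_list = []
--             for j in range(2**(i-1)):
--                 answer_list.append(new_list[j])
--                 if j != 2**(i-1) -1:
--                     answer_list.append(old_list[j])
--             answer_memo.append(answer_list)
--     answer = answer_memo[-1]
--     return answer
-- ===== SOURCE B (Python) =====
-- def solution(n):
--     # Emit the paperfolding sequence element-by-element: term m (1-based) is 1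
--     # iff the odd part of m is congruent to 3 mod 4.
--     if n < 2:
--         return [0]
--     out = []
--     for m in range(1, 2 ** n):
--         q = m
--         while q % 2 == 0:
--             q //= 2
--         out.append(1 if q % 4 == 3 else 0)
--     return out
-- ===== Notes on version B (the rewrite author's own statement) =====
-- stated objective: simpler
-- what changed: Replaces the bottom-up construction that builds and interleaves all n nested lists with a single pass that computes each term directly from its index via a closed form (term m is 1 iff the odd part of m is 3 mod 4).
import Mathlib
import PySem

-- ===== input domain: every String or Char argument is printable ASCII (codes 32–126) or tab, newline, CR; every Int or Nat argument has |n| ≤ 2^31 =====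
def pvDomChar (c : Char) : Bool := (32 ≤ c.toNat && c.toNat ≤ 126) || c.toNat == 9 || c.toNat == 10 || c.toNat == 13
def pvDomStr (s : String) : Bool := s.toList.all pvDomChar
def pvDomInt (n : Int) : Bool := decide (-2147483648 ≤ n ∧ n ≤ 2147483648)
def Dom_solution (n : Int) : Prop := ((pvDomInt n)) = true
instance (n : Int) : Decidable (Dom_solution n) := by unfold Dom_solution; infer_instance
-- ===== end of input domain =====

-- B replaces A's bottom-up interleaving of nested lists by a one-pass closed form
-- (term m is 1 iff the odd part of m is ≡ 3 mod 4); same output, simpler construction.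

-- ===== PORT A =====
-- one outer-loop iteration of A: build new_list, read old_list = answer_memo[-1],
-- interleave them in the inner loop, append the result to the memo
def stepA (memo : List (List Int)) (i : Int) : List (List Int) :=
  let newList := PySem.List.pyRepeat ([0, 1] : List Int) ((2 : Int) ^ (i - 2).toNat)
  let oldList := PySem.List.pyGetD memo (-1) []
  let answerList := (PySem.List.pyRange 0 ((2 : Int) ^ (i - 1).toNat)).foldl
    (fun acc j =>
      let acc2 := acc ++ [PySem.List.pyGetD newList j 0]
      if j ≠ (2 : Int) ^ (i - 1).toNat - 1 then acc2 ++ [PySem.List.pyGetD oldList j 0]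
      else acc2) []
  memo ++ [answerList]

def solution (n : Int) : List Int :=
  let memo : List (List Int) :=
    if n ≥ 2 then (PySem.List.pyRange 2 (n + 1)).foldl stepA [[0]] else [[0]]
  PySem.List.pyGetD memo (-1) []

-- ===== PORT B =====
-- the `while q % 2 == 0: q //= 2` loop of B (the 0 < q guard only makes it total)
def oddLoop (q : Int) : Int :=
  if h : 0 < q ∧ PySem.Int.mod q 2 = 0 then oddLoop (PySem.Int.floordiv q 2) else q
termination_by q.toNat
decreasing_by
  rw [PySem.Int.floordiv_eq_ediv_of_pos (by omega : (0:Int) < 2)]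
  omega

def solution_alt (n : Int) : List Int :=
  if n < 2 then [0]
  else (PySem.List.pyRange 1 ((2 : Int) ^ n.toNat)).foldl
    (fun out m => out ++ [if PySem.Int.mod (oddLoop m) 4 = 3 then (1 : Int) else 0]) []

-- ===== PRECONDITION & SPEC =====
def Spec_solution (n : Int) (out : List Int) : Prop := out = solution_alt n
instance (n : Int) (out : List Int) : Decidable (Spec_solution n out) := by unfold Spec_solution; infer_instance

-- ===== CLAIM (what is proved, stated in full; the proofs are below) =====
def Claim_equal_solution : Prop := ∀ (n : Int), Dom_solution n → Spec_solution n (solution n)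

-- ===== LEMMAS AND PROOFS =====

-- mathematical description shared by both proofs
def oddPartN (m : Nat) : Nat :=
  if h : 0 < m ∧ m % 2 = 0 then oddPartN (m / 2) else m
termination_by m
decreasing_by exact Nat.div_lt_self h.1 (by omega)

def val (m : Nat) : Int := if oddPartN m % 4 = 3 then 1 else 0

def L (i : Nat) : List Int := (List.range (2 ^ i - 1)).map (fun j => val (j + 1))

lemma oddPartN_odd (m : Nat) (h : m % 2 = 1) : oddPartN m = m := by
  rw [oddPartN]; simp [h]

lemma oddPartN_double (m : Nat) (h : 0 < m) : oddPartN (2 * m) = oddPartN m := by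
  rw [oddPartN]
  have : 2 * m / 2 = m := by omega
  simp [this, h, Nat.mul_mod_right]

lemma val_odd (j : Nat) : val (2 * j + 1) = ((j % 2 : Nat) : Int) := by
  unfold val
  rw [oddPartN_odd _ (by omega)]
  rcases Nat.mod_two_eq_zero_or_one j with h | h <;>
    · have : (2 * j + 1) % 4 = 2 * (j % 2) + 1 := by omega
      simp [this, h]

lemma val_even (j : Nat) (h : 0 < j) : val (2 * j) = val j := by
  unfold val; rw [oddPartN_double _ h]

lemma oddLoop_natCast (m : Nat) (h : 0 < m) : oddLoop (m : Int) = (oddPartN m : Int) := by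
  induction m using Nat.strong_induction_on with
  | _ m ih =>
    have h2 : PySem.Int.mod (m : Int) 2 = ((m % 2 : Nat) : Int) := PySem.Int.mod_natCast m 2
    have hd : PySem.Int.floordiv (m : Int) 2 = ((m / 2 : Nat) : Int) := PySem.Int.floordiv_natCast m 2
    rw [oddLoop, oddPartN]
    by_cases he : m % 2 = 0
    · have hlt : m / 2 < m := Nat.div_lt_self h (by omega)
      have hpos : 0 < m / 2 := by omega
      rw [dif_pos ⟨by exact_mod_cast h, by rw [h2, he]; rfl⟩, dif_pos ⟨h, he⟩, hd]
      exact ih _ hlt hpos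
    · have h1 : m % 2 = 1 := by omega
      have hn1 : ¬ (0 < (m : Int) ∧ PySem.Int.mod (m : Int) 2 = 0) := by
        rw [h2, h1]; simp
      have hn2 : ¬ (0 < m ∧ m % 2 = 0) := by omega
      rw [dif_neg hn1, dif_neg hn2]

-- interleaving a map over an odd range
lemma map_range_interleave (K : Nat) (f : Nat → Int) :
    (List.range (2 * K + 1)).map f
      = (List.range K).flatMap (fun j => [f (2 * j), f (2 * j + 1)]) ++ [f (2 * K)] := by
  induction K with
  | zero => simp
  | succ K ih =>
    have h1 : 2 * (K + 1) + 1 = (2 * K + 1) + 1 + 1 := by ring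
    rw [h1, List.range_succ, List.range_succ, List.map_append, List.map_append, ih,
        List.range_succ, List.flatMap_append]
    simp
    ring_nf

-- element of [0,1] * r
lemma pyRepeat01_getD (r j : Nat) (h : j < 2 * r) :
    ((PySem.List.pyRepeat ([0, 1] : List Int) (r : Int))).getD j 0 = ((j % 2 : Nat) : Int) := by
  simp only [PySem.List.pyRepeat, Int.toNat_natCast]
  induction r generalizing j with
  | zero => omega
  | succ r ih =>
    rw [List.replicate_succ, List.flatten_cons]
    match j with
    | 0 => rfl
    | 1 => rfl
    | (j + 2) =>
      show (List.flatten (List.replicate r [0, 1])).getD j 0 = _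
      rw [ih j (by omega)]
      congr 1
      omega

-- B computes L
lemma alt_eq (n : Int) (h : ¬ n < 2) : solution_alt n = L n.toNat := by
  have hcast : ((2 : Int) ^ n.toNat) = ((2 ^ n.toNat : Nat) : Int) := by push_cast; ring
  have hpow : 1 ≤ 2 ^ n.toNat := Nat.one_le_two_pow
  rw [solution_alt, if_neg h, PySem.List.foldl_append_singleton_eq_map, List.nil_append,
      PySem.List.pyRange_one, List.map_map]
  have hlen : ((2 : Int) ^ n.toNat - 1).toNat = 2 ^ n.toNat - 1 := by omega
  rw [hlen]
  apply List.map_congr_left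
  intro j hj
  show (if PySem.Int.mod (oddLoop (1 + (j : Int))) 4 = 3 then (1 : Int) else 0) = val (j + 1)
  have h1 : (1 + (j : Int)) = ((j + 1 : Nat) : Int) := by push_cast; ring
  rw [h1, oddLoop_natCast (j + 1) (by omega)]
  have hm4 := PySem.Int.mod_natCast (oddPartN (j + 1)) 4
  rw [show ((4 : Nat) : Int) = 4 by norm_num] at hm4
  rw [hm4]
  unfold val
  by_cases hv : oddPartN (j + 1) % 4 = 3
  · rw [if_pos hv, if_pos (by exact_mod_cast hv)]
  · rw [if_neg hv, if_neg (by exact_mod_cast hv)]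

-- one outer iteration turns L (e+1) into L (e+2)
lemma step_inner (e : Nat) (memo : List (List Int))
    (hm : PySem.List.pyGetD memo (-1) [] = L (e + 1)) :
    stepA memo ((e : Int) + 2) = memo ++ [L (e + 2)] := by
  have he2 : ((e : Int) + 2 - 2).toNat = e := by omega
  have he1 : ((e : Int) + 2 - 1).toNat = e + 1 := by omega
  have hc : ((2 : Int) ^ (e + 1)) = ((2 ^ (e + 1) : Nat) : Int) := by push_cast; ring
  have hce : ((2 : Int) ^ e) = ((2 ^ e : Nat) : Int) := by push_cast; ring
  have hK : 0 < 2 ^ (e + 1) := Nat.pow_pos (by omega)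
  have hdb : 2 ^ (e + 1) = 2 * 2 ^ e := by ring
  simp only [stepA]
  rw [hm, he2, he1]
  congr 1
  congr 1
  -- rewrite the inner-loop body into `acc ++ g j` form
  have hfun : (fun (acc : List Int) (j : Int) =>
      let acc2 := acc ++ [PySem.List.pyGetD (PySem.List.pyRepeat ([0, 1] : List Int) ((2:Int) ^ e)) j 0]
      if j ≠ (2 : Int) ^ (e + 1) - 1 then acc2 ++ [PySem.List.pyGetD (L (e + 1)) j 0] else acc2)
      = (fun acc j => acc ++
          ([PySem.List.pyGetD (PySem.List.pyRepeat ([0, 1] : List Int) ((2:Int) ^ e)) j 0] ++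
           if j ≠ (2 : Int) ^ (e + 1) - 1 then [PySem.List.pyGetD (L (e + 1)) j 0] else [])) := by
    funext acc j
    by_cases hj : j ≠ (2 : Int) ^ (e + 1) - 1 <;> simp [hj]
  rw [hfun, PySem.List.foldl_append_eq_flatMap, List.nil_append, hc,
      PySem.List.pyRange_zero_natCast, List.flatMap_map]
  -- split off the last index
  have hsplit : 2 ^ (e + 1) = (2 ^ (e + 1) - 1) + 1 := by omega
  rw [hsplit, List.range_succ, List.flatMap_append]
  -- target as an interleave
  have htgt : L (e + 2)
      = (List.range (2 ^ (e + 1) - 1)).flatMap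
          (fun j => [val (2 * j + 1), val (2 * j + 1 + 1)]) ++ [val (2 * (2 ^ (e + 1) - 1) + 1)] := by
    unfold L
    have h2 : 2 ^ (e + 2) - 1 = 2 * (2 ^ (e + 1) - 1) + 1 := by
      have : 2 ^ (e + 2) = 2 * 2 ^ (e + 1) := by ring
      omega
    rw [h2, map_range_interleave]
  rw [htgt]
  congr 1
  · apply List.flatMap_congr
    intro j hj
    rw [List.mem_range] at hj
    have hjlt : (j : Int) < (2 : Int) ^ (e + 1) - 1 := by
      rw [hc]; omega
    rw [if_pos (by omega), PySem.List.pyGetD_natCast, PySem.List.pyGetD_natCast, hce,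
        pyRepeat01_getD (2 ^ e) j (by omega)]
    unfold L
    rw [PySem.List.getD_map_range _ _ _ _ (by omega), val_odd]
    have : val (2 * j + 1 + 1) = val (j + 1) := by
      have h2 : 2 * j + 1 + 1 = 2 * (j + 1) := by ring
      rw [h2, val_even _ (by omega)]
    rw [this]
    rfl
  · simp only [List.flatMap_cons, List.flatMap_nil, List.append_nil]
    rw [if_neg (by omega), PySem.List.pyGetD_natCast, hce,
        pyRepeat01_getD (2 ^ e) (2 ^ (e + 1) - 1) (by omega), val_odd]
    rfl

-- the outer loop's last memo element is L k
lemma A_loop (k : Nat) (hk : 1 ≤ k) :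
    PySem.List.pyGetD ((PySem.List.pyRange 2 ((k : Int) + 1)).foldl stepA [[0]]) (-1) [] = L k := by
  induction k, hk using Nat.le_induction with
  | base =>
    rw [show ((1 : Nat) : Int) + 1 = 2 by norm_num, PySem.List.pyRange_one_eq_nil le_rfl]
    have h1 : oddPartN 1 = 1 := by rw [oddPartN]; simp
    have hL1 : L 1 = [0] := by simp [L, val, h1]
    rw [List.foldl_nil, hL1]
    decide
  | succ k hk ih =>
    have hc : ((k + 1 : Nat) : Int) + 1 = ((k : Int) + 1) + 1 := by push_cast; ring
    rw [hc, PySem.List.pyRange_one_succ_right (by omega : (2 : Int) ≤ (k : Int) + 1),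
        List.foldl_append, List.foldl_cons, List.foldl_nil]
    obtain ⟨e, rfl⟩ : ∃ e, k = e + 1 := ⟨k - 1, by omega⟩
    have he : ((e + 1 : Nat) : Int) + 1 = (e : Int) + 2 := by push_cast; ring
    have hstep := step_inner e _ ih
    rw [← he] at hstep
    rw [hstep, PySem.List.pyGetD_neg_one_append_singleton]

-- ===== VERDICT (by name: the statement is the Claim_ definition above) =====
theorem solution_spec : Claim_equal_solution := by
  intro n _
  unfold Spec_solution
  by_cases h : n < 2
  · have : ¬ n ≥ 2 := by omega
    simp [solution, solution_alt, this, h, PySem.List.pyGetD_neg_one]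
  · have h2 : n ≥ 2 := by omega
    have hn : n = ((n.toNat : Int)) := by omega
    rw [alt_eq n h]
    show PySem.List.pyGetD (if n ≥ 2 then (PySem.List.pyRange 2 (n + 1)).foldl stepA [[0]] else [[0]]) (-1) [] = _
    rw [if_pos h2, hn]
    exact A_loop n.toNat (by omega)
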